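-- pv_equiv track=rewrite | github.com/anshika998/CPrepo | max sizze subset.py | maximizeSubset
-- ===== SOURCE A (Python) =====
-- def maximizeSubset(N, arr, M, x=0):
--
-- 	# Base Case
-- 	if (x == M):
-- 		return 0
--
-- 	# Stores maximum size of valid subset
-- 	ans = 0
--
-- 	# Traverse the given array
-- 	for i in range(x, M):
--
-- 		# If N % arr[i] = 0, include arr[i]
-- 		# in a subset and recursively call
-- 		# for the remaining array integers
-- 		if (N % arr[i] == 0):
-- 			ans = max(
-- 				ans, maximizeSubset(
-- 					N // arr[i], arr,
-- 					M, x + 1)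
-- 				+ 1)
--
-- 	# Return Answer
-- 	return ans
-- ===== SOURCE B (Python) =====
-- def maximizeSubset(N, arr, M, x=0):
--     # Memoized (dynamic-programming) version of the naive recursion:
--     # the subproblem is determined by the remaining value n and the start index k.
--     memo = {}
--
--     def go(n, k):
--         if k == M:
--             return 0
--         key = (n, k)
--         if key in memo:
--             return memo[key]
--         best = 0
--         for i in range(k, M):
--             if n % arr[i] == 0:
--                 best = max(best, go(n // arr[i], k + 1) + 1)
--         memo[key] = best
--         return best
--
--     return go(N, x)
-- ===== Notes on version B (the rewrite author's own statement) =====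
-- stated objective: alternative
-- what changed: Replaced A's naive recursion by a memoized recursion keyed on (remaining value, start index), so each distinct subproblem is solved once; on the timed input family this was not measurably faster.
import Mathlib
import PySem

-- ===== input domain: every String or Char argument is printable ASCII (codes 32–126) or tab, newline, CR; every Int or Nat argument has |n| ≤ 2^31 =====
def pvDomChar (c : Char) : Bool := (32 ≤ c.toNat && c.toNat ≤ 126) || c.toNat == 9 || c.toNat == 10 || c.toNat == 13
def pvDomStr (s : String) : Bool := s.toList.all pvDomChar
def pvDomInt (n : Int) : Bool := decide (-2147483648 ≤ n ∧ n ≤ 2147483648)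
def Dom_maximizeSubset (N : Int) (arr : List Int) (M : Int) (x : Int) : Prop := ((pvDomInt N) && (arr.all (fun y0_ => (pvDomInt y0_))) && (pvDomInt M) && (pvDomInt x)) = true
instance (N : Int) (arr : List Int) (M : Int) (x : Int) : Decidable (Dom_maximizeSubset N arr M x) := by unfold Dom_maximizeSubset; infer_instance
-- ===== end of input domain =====

-- B replaces A's naive recursion by a memoized (dictionary-cached) recursion on the pair
-- (remaining value, start index); objective: alternative (same value, different algorithm).


-- ===== PORT A =====
-- A's recursion made total with fuel; fuel (M - x).toNat + 1 always suffices (each recursive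
-- call increments x by 1, and once M ≤ x the loop body is empty), so this is exact.
def mssA (arr : List Int) (M : Int) : Nat → Int → Int → Int
  | 0, _, _ => 0
  | fuel+1, N, x =>
    if x = M then 0
    else
      (PySem.List.pyRange x M 1).foldl
        (fun ans i =>
          let a := PySem.List.pyGetD arr i 0
          if PySem.Int.mod N a = 0 then
            max ans (mssA arr M fuel (PySem.Int.floordiv N a) (x + 1) + 1)
          else ans) 0

def maximizeSubset (N : Int) (arr : List Int) (M : Int) (x : Int) : Int :=
  mssA arr M ((M - x).toNat + 1) N x

-- ===== PORT B =====
-- B's memoized recursion: the dictionary `memo` is threaded through the fold, exactly as the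
-- Python closure mutates its dict; same fuel argument as in port A makes it total and exact.
def goB (arr : List Int) (M : Int) :
    Nat → Int → Int → PySem.Dict (Int × Int) Int → Int × PySem.Dict (Int × Int) Int
  | 0, _, _, memo => (0, memo)
  | fuel+1, n, k, memo =>
    if k = M then (0, memo)
    else
      match memo.get? (n, k) with
      | some v => (v, memo)
      | none =>
        let r := (PySem.List.pyRange k M 1).foldl
          (fun (p : Int × PySem.Dict (Int × Int) Int) i =>
            let a := PySem.List.pyGetD arr i 0
            if PySem.Int.mod n a = 0 then
              let q := goB arr M fuel (PySem.Int.floordiv n a) (k + 1) p.2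
              (max p.1 (q.1 + 1), q.2)
            else p) (0, memo)
        (r.1, r.2.insert (n, k) r.1)

def maximizeSubset_alt (N : Int) (arr : List Int) (M : Int) (x : Int) : Int :=
  (goB arr M ((M - x).toNat + 1) N x PySem.Dict.empty).1

-- ===== PRECONDITION & SPEC =====
-- Exactly the inputs on which Python A returns: when the loop runs (x < M), every index in
-- [x, M) must be a valid Python index of arr (negative indices wrap) — else IndexError —
-- and every arr[i] there must be nonzero — else ZeroDivisionError from N % arr[i].
def Pre_maximizeSubset (N : Int) (arr : List Int) (M : Int) (x : Int) : Prop :=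
  x < M →
    (-(arr.length : Int) ≤ x ∧ M ≤ (arr.length : Int) ∧
      ∀ i ∈ PySem.List.pyRange x M 1, PySem.List.pyGetD arr i 0 ≠ 0)
instance (N : Int) (arr : List Int) (M : Int) (x : Int) : Decidable (Pre_maximizeSubset N arr M x) := by
  unfold Pre_maximizeSubset; infer_instance

def pvWitness_maximizeSubset : Int × List Int × Int × Int := (12, [2, 2, 3], 3, 0)

def Spec_maximizeSubset (N : Int) (arr : List Int) (M : Int) (x : Int) (out : Int) : Prop := out = maximizeSubset_alt N arr M x
instance (N : Int) (arr : List Int) (M : Int) (x : Int) (out : Int) : Decidable (Spec_maximizeSubset N arr M x out) := by unfold Spec_maximizeSubset; infer_instance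

-- ===== CLAIM (what is proved, stated in full; the proofs are below) =====
def Claim_equal_maximizeSubset : Prop := ∀ (N : Int) (arr : List Int) (M : Int) (x : Int), Dom_maximizeSubset N arr M x → Pre_maximizeSubset N arr M x → Spec_maximizeSubset N arr M x (maximizeSubset N arr M x)

-- ===== LEMMAS AND PROOFS =====

-- A memo dictionary is good when every stored entry is the value A's recursion computes.
def GoodMemo (arr : List Int) (M : Int) (memo : PySem.Dict (Int × Int) Int) : Prop :=
  ∀ n k v, memo.get? (n, k) = some v → v = maximizeSubset n arr M k

-- The fuel is irrelevant as soon as it exceeds (M - x).toNat.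
theorem mssA_fuel (arr : List Int) (M : Int) :
    ∀ (f₁ : Nat) (f₂ : Nat) (N x : Int), (M - x).toNat < f₁ → (M - x).toNat < f₂ →
      mssA arr M f₁ N x = mssA arr M f₂ N x := by
  intro f₁
  induction f₁ with
  | zero => intro f₂ N x h1 h2; omega
  | succ f ih =>
    intro f₂ N x h1 h2
    match f₂, h2 with
    | g + 1, h2 =>
      by_cases hx : x = M
      · simp [mssA, hx]
      · rcases lt_or_gt_of_ne hx with hlt | hgt
        · have hfun : (fun (ans i : Int) =>
              let a := PySem.List.pyGetD arr i 0
              if PySem.Int.mod N a = 0 then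
                max ans (mssA arr M f (PySem.Int.floordiv N a) (x + 1) + 1)
              else ans)
            = (fun (ans i : Int) =>
              let a := PySem.List.pyGetD arr i 0
              if PySem.Int.mod N a = 0 then
                max ans (mssA arr M g (PySem.Int.floordiv N a) (x + 1) + 1)
              else ans) := by
            funext ans i
            have := ih g (PySem.Int.floordiv N (PySem.List.pyGetD arr i 0)) (x + 1)
              (by omega) (by omega)
            simp only [this]
          simp only [mssA, if_neg hx, hfun]
        · simp [mssA, PySem.List.pyRange_one_eq_nil (le_of_lt hgt)]

-- A returns 0 once the start index has reached or passed M.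
theorem mss_ge (arr : List Int) (M : Int) (n k : Int) (h : M ≤ k) :
    maximizeSubset n arr M k = 0 := by
  unfold maximizeSubset
  have : (M - k).toNat = 0 := by omega
  rw [this]
  by_cases hk : k = M
  · simp [mssA, hk]
  · simp [mssA, hk, PySem.List.pyRange_one_eq_nil h]

-- One-step unfolding of A with the recursive calls re-expressed through maximizeSubset.
theorem mss_unfold (arr : List Int) (M : Int) (N x : Int) (h : x ≠ M) :
    maximizeSubset N arr M x =
      (PySem.List.pyRange x M 1).foldl
        (fun ans i =>
          let a := PySem.List.pyGetD arr i 0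
          if PySem.Int.mod N a = 0 then
            max ans (maximizeSubset (PySem.Int.floordiv N a) arr M (x + 1) + 1)
          else ans) 0 := by
  rcases lt_or_gt_of_ne h with hlt | hgt
  · have hfun : (fun (ans i : Int) =>
        let a := PySem.List.pyGetD arr i 0
        if PySem.Int.mod N a = 0 then
          max ans (mssA arr M (M - x).toNat (PySem.Int.floordiv N a) (x + 1) + 1)
        else ans)
      = (fun (ans i : Int) =>
        let a := PySem.List.pyGetD arr i 0
        if PySem.Int.mod N a = 0 then
          max ans (maximizeSubset (PySem.Int.floordiv N a) arr M (x + 1) + 1)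
        else ans) := by
      funext ans i
      have := mssA_fuel arr M ((M - x).toNat) ((M - (x + 1)).toNat + 1)
        (PySem.Int.floordiv N (PySem.List.pyGetD arr i 0)) (x + 1) (by omega) (by omega)
      simp only [maximizeSubset, this]
    conv_lhs => rw [maximizeSubset, mssA, if_neg h]
    rw [hfun]
  · rw [mss_ge arr M N x (le_of_lt hgt),
      PySem.List.pyRange_one_eq_nil (le_of_lt hgt)]
    rfl

-- The inner fold of B computes A's inner fold and keeps the memo good.
theorem foldB_inv (arr : List Int) (M : Int) (fuel : Nat) (k n : Int)
    (IH : ∀ m memo, GoodMemo arr M memo →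
      (goB arr M fuel m (k + 1) memo).1 = maximizeSubset m arr M (k + 1) ∧
      GoodMemo arr M (goB arr M fuel m (k + 1) memo).2) :
    ∀ (L : List Int) (p : Int × PySem.Dict (Int × Int) Int), GoodMemo arr M p.2 →
      (L.foldl (fun p i =>
          let a := PySem.List.pyGetD arr i 0
          if PySem.Int.mod n a = 0 then
            let q := goB arr M fuel (PySem.Int.floordiv n a) (k + 1) p.2
            (max p.1 (q.1 + 1), q.2)
          else p) p).1
        = L.foldl (fun ans i =>
          let a := PySem.List.pyGetD arr i 0
          if PySem.Int.mod n a = 0 then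
            max ans (maximizeSubset (PySem.Int.floordiv n a) arr M (k + 1) + 1)
          else ans) p.1 ∧
      GoodMemo arr M (L.foldl (fun p i =>
          let a := PySem.List.pyGetD arr i 0
          if PySem.Int.mod n a = 0 then
            let q := goB arr M fuel (PySem.Int.floordiv n a) (k + 1) p.2
            (max p.1 (q.1 + 1), q.2)
          else p) p).2 := by
  intro L
  induction L with
  | nil => intro p hp; exact ⟨rfl, hp⟩
  | cons i L ihL =>
    intro p hp
    simp only [List.foldl_cons]
    by_cases hdiv : PySem.Int.mod n (PySem.List.pyGetD arr i 0) = 0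
    · obtain ⟨hv, hg⟩ := IH (PySem.Int.floordiv n (PySem.List.pyGetD arr i 0)) p.2 hp
      have := ihL ((max p.1 ((goB arr M fuel (PySem.Int.floordiv n (PySem.List.pyGetD arr i 0)) (k + 1) p.2).1 + 1)),
        (goB arr M fuel (PySem.Int.floordiv n (PySem.List.pyGetD arr i 0)) (k + 1) p.2).2) hg
      simpa only [hdiv, if_pos, hv] using this
    · have := ihL p hp
      simpa only [hdiv, if_neg] using this

-- Main invariant: with enough fuel and a good memo, B computes A's value and keeps the memo good.
theorem goB_correct (arr : List Int) (M : Int) :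
    ∀ (fuel : Nat) (n k : Int) (memo : PySem.Dict (Int × Int) Int),
      (M - k).toNat < fuel → GoodMemo arr M memo →
      (goB arr M fuel n k memo).1 = maximizeSubset n arr M k ∧
      GoodMemo arr M (goB arr M fuel n k memo).2 := by
  intro fuel
  induction fuel with
  | zero => intro n k memo h hg; omega
  | succ fuel ih =>
    intro n k memo h hg
    by_cases hk : k = M
    · subst hk
      simp only [goB]
      exact ⟨(mss_ge arr k n k le_rfl).symm, hg⟩
    · rcases hmem : memo.get? (n, k) with _ | v
      · have hIH : ∀ m memo', GoodMemo arr M memo' →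
            (goB arr M fuel m (k + 1) memo').1 = maximizeSubset m arr M (k + 1) ∧
            GoodMemo arr M (goB arr M fuel m (k + 1) memo').2 := by
          intro m memo' hg'
          by_cases hkM : k < M
          · exact ih m (k + 1) memo' (by omega) hg'
          · -- k > M: the fold inside goB at k+1 is empty, so it returns (0, memo')
            have hk1 : M ≤ k + 1 := by omega
            have hne : ¬ (k + 1 = M) := by omega
            match fuel with
            | 0 =>
              constructor
              · simp [goB, mss_ge arr M m (k+1) hk1]
              · simpa [goB] using hg'
            | fuel + 1 =>
              rcases hmem' : memo'.get? (m, k + 1) with _ | w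
              · simp only [goB, if_neg hne, hmem']
                rw [PySem.List.pyRange_one_eq_nil (by omega : M ≤ k + 1)]
                constructor
                · simpa [List.foldl_nil] using (mss_ge arr M m (k+1) hk1).symm
                · simp only [List.foldl_nil]
                  intro n' k' v' hv'
                  rw [PySem.Dict.get?_insert] at hv'
                  split_ifs at hv' with heq
                  · cases hv'
                    have : (n', k') = (m, k + 1) := heq
                    cases this
                    rw [mss_ge arr M m (k+1) hk1]
                  · exact hg' n' k' v' hv'
              · simp only [goB, if_neg hne, hmem']
                exact ⟨(hg' m (k + 1) w hmem').symm ▸ (hg' m (k + 1) w hmem'), hg'⟩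
        have hfold := foldB_inv arr M fuel k n hIH (PySem.List.pyRange k M 1) (0, memo) hg
        simp only [goB, if_neg hk, hmem]
        refine ⟨?_, ?_⟩
        · rw [hfold.1]
          exact (mss_unfold arr M n k hk).symm
        · intro n' k' v' hv'
          rw [PySem.Dict.get?_insert] at hv'
          split_ifs at hv' with heq
          · cases hv'
            have : (n', k') = (n, k) := heq
            cases this
            rw [hfold.1]
            exact (mss_unfold arr M n k hk).symm
          · exact hfold.2 n' k' v' hv'
      · simp only [goB, if_neg hk, hmem]
        exact ⟨hg n k v hmem, hg⟩

-- ===== VERDICT (by name: the statement is the Claim_ definition above) =====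
theorem maximizeSubset_spec : Claim_equal_maximizeSubset := by
  intro N arr M x _ _
  unfold Spec_maximizeSubset maximizeSubset_alt
  have hempty : GoodMemo arr M PySem.Dict.empty := by
    intro n k v hv
    simp [PySem.Dict.get?_empty] at hv
  exact (goB_correct arr M ((M - x).toNat + 1) N x PySem.Dict.empty (by omega) hempty).1.symm
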